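-- pv_equiv track=rewrite | github.com/pypi-data/pypi-mirror-74 | packages/proteomeClusteringtest2/proteomeClusteringtest2-0.0.7.tar.gz/proteomeClusteringtest2-0.0.7/ProteomeClustering/Visualization/ScatterPlot.py | __TurnStrSerToIntLi
-- ===== SOURCE A (Python) =====
-- def __TurnStrSerToIntLi(currentFeatureSer):
--     """
--     turn a string series into int [0,1,2,3,3,2....]
--
--     :param currentFeatureSer: the Series includes each sample's feature value. ['white','black','white']
--     :return: number list, [0,1,2,2]means 4 samples in different 3 different feature values
--     """
--     numLi = [0 for x in range(len(currentFeatureSer))]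
--     featureSetLi = (list(set(currentFeatureSer)))
--     featureSetLi.sort(reverse=False)
--     for k in range(len(currentFeatureSer)):
--
--         num = 0
--         for featureValue in featureSetLi:
--             if currentFeatureSer[k] == featureValue:
--                 numLi[k] = num
--             num += 1
--     return numLi
-- ===== SOURCE B (Python) =====
-- def __TurnStrSerToIntLi(currentFeatureSer):
--     # Rank of each element = number of DISTINCT values strictly smaller than it.
--     # No sort, no per-element scan of a sorted unique list.
--     distinct = set(currentFeatureSer)
--     return [sum(1 for v in distinct if v < x) for x in currentFeatureSer]
-- ===== Notes on version B (the rewrite author's own statement) =====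
-- stated objective: alternative
-- what changed: Instead of sorting the unique values and scanning that sorted list per element to find its index, B never sorts: each element's rank is computed directly as the number of distinct values strictly smaller than it.
import Mathlib
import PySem

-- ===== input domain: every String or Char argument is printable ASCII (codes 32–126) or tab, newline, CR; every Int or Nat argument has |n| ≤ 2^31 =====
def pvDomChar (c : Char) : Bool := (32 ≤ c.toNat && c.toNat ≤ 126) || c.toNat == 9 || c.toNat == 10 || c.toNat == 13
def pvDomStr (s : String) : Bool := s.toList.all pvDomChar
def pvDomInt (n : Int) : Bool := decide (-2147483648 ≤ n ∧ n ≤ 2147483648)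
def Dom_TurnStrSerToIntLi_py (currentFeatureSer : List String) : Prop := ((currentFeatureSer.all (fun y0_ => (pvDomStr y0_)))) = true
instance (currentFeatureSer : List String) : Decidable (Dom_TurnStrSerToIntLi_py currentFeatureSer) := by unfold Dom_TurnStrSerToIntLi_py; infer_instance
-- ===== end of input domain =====

-- B replaces A's sort+per-element-scan by counting, per element, the distinct values strictly smaller (alternative decomposition, similar cost).


-- ===== PORT A =====
def TurnStrSerToIntLi_py (currentFeatureSer : List String) : List Int :=
  let numLi : List Int :=
    (PySem.List.pyRange 0 (PySem.List.len currentFeatureSer) 1).map (fun _ => 0)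
  let featureSetLi : List String :=
    PySem.List.sorted (PySem.Set.ofList currentFeatureSer) (fun x => x) false
  (PySem.List.pyRange 0 (PySem.List.len currentFeatureSer) 1).foldl (fun numLi k =>
    (featureSetLi.foldl (fun (st : List Int × Int) featureValue =>
        (if PySem.List.pyGetD currentFeatureSer k "" = featureValue
           then PySem.List.pySetD st.1 k st.2 else st.1,
         st.2 + 1))
      (numLi, (0 : Int))).1) numLi

-- ===== PORT B =====
def TurnStrSerToIntLi_py_alt (currentFeatureSer : List String) : List Int :=
  let distinct : PySem.Set String := PySem.Set.ofList currentFeatureSer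
  currentFeatureSer.map (fun x => ((distinct.countP (fun v => decide (v < x)) : Nat) : Int))

-- ===== PRECONDITION & SPEC =====
def Spec_TurnStrSerToIntLi_py (currentFeatureSer : List String) (out : List Int) : Prop := out = TurnStrSerToIntLi_py_alt currentFeatureSer
instance (currentFeatureSer : List String) (out : List Int) : Decidable (Spec_TurnStrSerToIntLi_py currentFeatureSer out) := by unfold Spec_TurnStrSerToIntLi_py; infer_instance

-- ===== CLAIM (what is proved, stated in full; the proofs are below) =====
def Claim_equal_TurnStrSerToIntLi_py : Prop := ∀ (currentFeatureSer : List String), Dom_TurnStrSerToIntLi_py currentFeatureSer → Spec_TurnStrSerToIntLi_py currentFeatureSer (TurnStrSerToIntLi_py currentFeatureSer)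

-- ===== LEMMAS AND PROOFS =====

-- inner loop of A: if x occurs nowhere in l, numLi is untouched
theorem pv_inner_notmem (x : String) (k : Int) (l : List String) (li : List Int) (n : Int)
    (h : x ∉ l) :
    (l.foldl (fun (st : List Int × Int) fv =>
        (if x = fv then PySem.List.pySetD st.1 k st.2 else st.1, st.2 + 1)) (li, n)).1 = li := by
  induction l generalizing li n with
  | nil => rfl
  | cons h' t ih =>
    simp only [List.mem_cons, not_or] at h
    simp only [List.foldl_cons, if_neg h.1]
    exact ih li (n + 1) h.2

-- inner loop of A on a strictly increasing list containing x: numLi gets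
-- numLi[k] = n + (#elements < x)
theorem pv_inner_mem (x : String) (k : Int) (l : List String) (li : List Int) (n : Int)
    (hs : l.Pairwise (· < ·)) (hx : x ∈ l) :
    (l.foldl (fun (st : List Int × Int) fv =>
        (if x = fv then PySem.List.pySetD st.1 k st.2 else st.1, st.2 + 1)) (li, n)).1
      = PySem.List.pySetD li k (n + (l.countP (fun v => decide (v < x)) : Int)) := by
  induction l generalizing li n with
  | nil => cases hx
  | cons h t ih =>
    rcases List.pairwise_cons.mp hs with ⟨hlt, hpt⟩
    by_cases hxh : x = h
    · subst hxh
      simp only [List.foldl_cons, if_pos]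
      rw [pv_inner_notmem x k t _ _ (fun hxt => lt_irrefl x (hlt x hxt))]
      have hc : ((x :: t).countP (fun v => decide (v < x))) = 0 := by
        rw [List.countP_eq_zero]
        intro a ha
        rcases List.mem_cons.mp ha with rfl | hat
        · simp
        · simpa using not_lt_of_gt (hlt a hat)
      rw [hc]; simp
    · rcases List.mem_cons.mp hx with rfl | hxt
      · exact absurd rfl hxh
      have hhx : h < x := hlt x hxt
      simp only [List.foldl_cons, if_neg hxh]
      rw [ih li (n + 1) hpt hxt]
      have hc : ((h :: t).countP (fun v => decide (v < x)))
          = (t.countP (fun v => decide (v < x))) + 1 := by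
        rw [List.countP_cons]
        simp [hhx]
      rw [hc]
      congr 1
      push_cast
      ring

-- the outer loop fills positions 0..m-1 with the rank function, leaving the rest of li
theorem pv_outer (ser : List String) (u : List String)
    (hs : u.Pairwise (· < ·)) (hmem : ∀ y ∈ ser, y ∈ u) :
    ∀ (m : Nat), m ≤ ser.length → ∀ (li : List Int), li.length = ser.length →
    (PySem.List.pyRange 0 (m : Int) 1).foldl (fun numLi k =>
      (u.foldl (fun (st : List Int × Int) fv =>
          (if PySem.List.pyGetD ser k "" = fv then PySem.List.pySetD st.1 k st.2 else st.1,
           st.2 + 1)) (numLi, (0 : Int))).1) li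
      = (ser.take m).map (fun x => ((u.countP (fun v => decide (v < x)) : Nat) : Int))
         ++ li.drop m := by
  intro m
  induction m with
  | zero => intro _ li _; simp
  | succ m ih =>
    intro hm li hlen
    have hm' : m ≤ ser.length := Nat.le_of_succ_le hm
    have hmlt : m < ser.length := hm
    have : ((m : Int) + 1) = ((m + 1 : Nat) : Int) := by push_cast; ring
    rw [← this, PySem.List.pyRange_one_succ_right (by positivity), List.foldl_append,
        ih hm' li hlen]
    simp only [List.foldl_cons, List.foldl_nil]
    have hget : PySem.List.pyGetD ser (m : Int) "" = ser[m] := by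
      rw [PySem.List.pyGetD_natCast]
      exact List.getD_eq_getElem ser "" hmlt
    rw [hget, pv_inner_mem _ _ _ _ _ hs (hmem _ (List.getElem_mem hmlt))]
    have hlen2 : ((ser.take m).map (fun x => ((u.countP (fun v => decide (v < x)) : Nat) : Int))).length = m := by
      simp [List.length_take, Nat.min_eq_left hm']
    rw [PySem.List.pySetD_natCast, zero_add]
    rw [List.set_append]
    rw [hlen2]
    simp only [lt_irrefl, Nat.sub_self]
    rw [List.take_add_one, List.map_append, List.append_assoc]
    simp only [hmlt, List.getElem?_eq_getElem, Option.toList_some, List.map_cons, List.map_nil,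
      List.singleton_append]
    rw [List.drop_eq_getElem_cons (by omega : m < li.length)]
    rfl

-- ===== VERDICT (by name: the statement is the Claim_ definition above) =====
theorem TurnStrSerToIntLi_py_spec : Claim_equal_TurnStrSerToIntLi_py := by
  intro ser _
  unfold Spec_TurnStrSerToIntLi_py TurnStrSerToIntLi_py TurnStrSerToIntLi_py_alt
  set u := PySem.List.sorted (PySem.Set.ofList ser) (fun x => x) false with hu
  have hperm : u.Perm (PySem.Set.ofList ser) := PySem.List.sorted_perm _ _ _
  have hs : u.Pairwise (· < ·) := PySem.List.sorted_ofList_pairwise_lt ser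
  have hmem : ∀ y ∈ ser, y ∈ u := by
    intro y hy
    exact hperm.mem_iff.mpr ((PySem.Set.mem_ofList _ _).mpr hy)
  have hlen0 : ((PySem.List.pyRange 0 ((ser.length : Int)) 1).map (fun _ => (0 : Int))).length
      = ser.length := by
    simp [PySem.List.length_pyRange_one]
  simp only [PySem.List.len_eq]
  have := pv_outer ser u hs hmem ser.length (le_refl _)
    ((PySem.List.pyRange 0 (ser.length : Int) 1).map (fun _ => (0 : Int)))
    hlen0
  rw [this, List.take_length, List.drop_eq_nil_of_le (by simp [PySem.List.length_pyRange_one]), List.append_nil]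
  apply List.map_congr_left
  intro x hx
  congr 1
  exact (hperm.countP_eq _)
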